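-- pv_equiv track=rewrite | github.com/geraldosneto/Quine-McCluskey--PROJETO | PROJETO/PROJETO .py | mudar_para_binario
-- ===== SOURCE A (Python) =====
-- negado = "'"
--
-- binario_0 = "0"
--
-- BINARIO_1 = "1"
--
-- def mudar_para_binario(termos):
--
--     #Transforma os termos, em binarios.
--
--     binarios = []
--
--     for termo in termos:
--         aux = ""
--         for t in range(len(termo)):
--             if termo[t] != negado:
--                 if t + 1 <= len(termo) - 1 and termo[t + 1] == negado:
--                     aux += binario_0
--                 else:
--                     aux += BINARIO_1
--         binarios.append(aux)
--
--     binarios.sort()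
--
--     return binarios
-- ===== SOURCE B (Python) =====
-- def mudar_para_binario(termos):
--     # Backward scan with a carried "just saw a quote" flag instead of an
--     # indexed forward loop with lookahead; output is built reversed then flipped.
--     binarios = []
--     for termo in termos:
--         out = []
--         quoted = False
--         for c in reversed(termo):
--             if c == "'":
--                 quoted = True
--             else:
--                 out.append('0' if quoted else '1')
--                 quoted = False
--         binarios.append(''.join(reversed(out)))
--     binarios.sort()
--     return binarios
-- ===== Notes on version B (the rewrite author's own statement) =====
-- stated objective: alternative
-- what changed: Replaced the forward indexed loop with one-character lookahead by a backward scan carrying a 'just saw a quote' flag, appending marks to a reversed buffer that is flipped at the end; no indexing or lookahead remains.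
import Mathlib
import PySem

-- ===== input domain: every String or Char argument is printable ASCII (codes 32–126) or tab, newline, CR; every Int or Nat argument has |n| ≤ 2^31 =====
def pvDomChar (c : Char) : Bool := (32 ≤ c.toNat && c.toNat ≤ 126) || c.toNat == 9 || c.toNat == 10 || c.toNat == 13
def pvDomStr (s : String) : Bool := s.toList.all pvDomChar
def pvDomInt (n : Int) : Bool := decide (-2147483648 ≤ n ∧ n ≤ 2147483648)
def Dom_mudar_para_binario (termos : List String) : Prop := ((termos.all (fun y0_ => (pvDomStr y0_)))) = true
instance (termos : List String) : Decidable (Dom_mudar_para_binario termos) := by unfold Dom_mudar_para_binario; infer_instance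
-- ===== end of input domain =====

-- B replaces A's forward indexed lookahead loop by a backward scan with a carried quote flag (alternative decomposition; return value only).

-- ===== PORT A =====
-- inner loop of A: indexed scan with one-character lookahead, accumulating aux
def pvAuxA (s : List Char) : List Char :=
  (List.range s.length).foldl
    (fun aux t =>
      if s.getD t ' ' ≠ '\'' then
        if t + 1 ≤ s.length - 1 ∧ s.getD (t + 1) ' ' = '\'' then aux ++ ['0'] else aux ++ ['1']
      else aux) []

def mudar_para_binario (termos : List String) : List String :=
  PySem.List.sorted
    (termos.foldl (fun binarios termo => binarios ++ [String.ofList (pvAuxA termo.toList)]) [])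
    (fun x => x) false

-- ===== PORT B =====
-- B's inner loop: scan the reversed term with a (quoted, out) state, then flip out
def pvTermRev (s : List Char) : List Char :=
  ((s.reverse).foldl
    (fun st c =>
      if c = '\'' then (true, st.2)
      else (false, st.2 ++ [if st.1 then '0' else '1']))
    ((false, []) : Bool × List Char)).2.reverse

def mudar_para_binario_alt (termos : List String) : List String :=
  PySem.List.sorted
    (termos.foldl (fun binarios termo => binarios ++ [String.ofList (pvTermRev termo.toList)]) [])
    (fun x => x) false

-- ===== PRECONDITION & SPEC =====
def Spec_mudar_para_binario (termos : List String) (out : List String) : Prop := out = mudar_para_binario_alt termos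
instance (termos : List String) (out : List String) : Decidable (Spec_mudar_para_binario termos out) := by unfold Spec_mudar_para_binario; infer_instance

-- ===== CLAIM =====
def Claim_equal_mudar_para_binario : Prop := ∀ (termos : List String), Dom_mudar_para_binario termos → Spec_mudar_para_binario termos (mudar_para_binario termos)

-- ===== LEMMAS AND PROOFS =====

-- recursive characterisation both inner loops are proved equal to
def pvHeadQuote : List Char → Bool
  | [] => false
  | d :: _ => d = '\''

def pvG : List Char → List Char
  | [] => []
  | c :: rest =>
    (if c = '\'' then [] else [if pvHeadQuote rest then '0' else '1']) ++ pvG rest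

-- the list A's inner loop appends for index t
def pvH (s : List Char) (t : Nat) : List Char :=
  if s.getD t ' ' ≠ '\'' then
    if t + 1 ≤ s.length - 1 ∧ s.getD (t + 1) ' ' = '\'' then ['0'] else ['1']
  else []

theorem pvFoldlApp {α : Type} (h : α → List Char) (l : List α) (init : List Char) :
    l.foldl (fun acc t => acc ++ h t) init = init ++ l.flatMap h := by
  induction l generalizing init with
  | nil => simp
  | cons x xs ih => simp [ih]

theorem pvAuxA_eq_flat (s : List Char) :
    pvAuxA s = (List.range s.length).flatMap (pvH s) := by
  have : pvAuxA s = (List.range s.length).foldl (fun acc t => acc ++ pvH s t) [] := by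
    unfold pvAuxA
    congr 1
    funext aux t
    unfold pvH
    split
    · split <;> rfl
    · simp
  rw [this, pvFoldlApp]
  simp

theorem pvH_succ (c : Char) (rest : List Char) (t : Nat) :
    pvH (c :: rest) (t + 1) = pvH rest t := by
  have hle : (t + 1 + 1 ≤ (c :: rest).length - 1) = (t + 1 ≤ rest.length - 1) := by
    simp only [List.length_cons]
    apply propext; omega
  simp only [pvH, List.getD_cons_succ, hle]

theorem pvFlat_eq_G (s : List Char) :
    (List.range s.length).flatMap (pvH s) = pvG s := by
  induction s with
  | nil => simp [pvG]
  | cons c rest ih =>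
    rw [List.length_cons, List.range_succ_eq_map]
    simp only [List.flatMap_cons, List.flatMap_map]
    have htail : (List.range rest.length).flatMap (fun t => pvH (c :: rest) (t + 1)) = pvG rest := by
      rw [← ih]
      exact List.flatMap_congr (fun t _ => pvH_succ c rest t)
    rw [htail]
    cases rest with
    | nil => by_cases hc : c = '\'' <;> simp [pvH, pvG, pvHeadQuote, hc]
    | cons d r => by_cases hc : c = '\'' <;> by_cases hd : d = '\'' <;> simp [pvH, pvG, pvHeadQuote, hc, hd]

theorem pvAuxA_eq_G (s : List Char) : pvAuxA s = pvG s := by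
  rw [pvAuxA_eq_flat, pvFlat_eq_G]

-- B's inner loop as a foldr over the term (foldl over the reverse)
def pvStepB (c : Char) (st : Bool × List Char) : Bool × List Char :=
  if c = '\'' then (true, st.2) else (false, st.2 ++ [if st.1 then '0' else '1'])

theorem pvFoldrB (s : List Char) :
    (s.foldr pvStepB (false, [])).1 = pvHeadQuote s ∧
    (s.foldr pvStepB (false, [])).2.reverse = pvG s := by
  induction s with
  | nil => simp [pvHeadQuote, pvG]
  | cons c rest ih =>
    simp only [List.foldr_cons]
    by_cases hc : c = '\''
    · refine ⟨by simp [pvStepB, hc, pvHeadQuote], ?_⟩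
      simpa [pvStepB, hc, pvG] using ih.2
    · refine ⟨by simp [pvStepB, hc, pvHeadQuote], ?_⟩
      cases rest with
      | nil =>
        simp [pvStepB, hc, pvG, pvHeadQuote]
      | cons d r =>
        have h1 := ih.1
        have h2 := ih.2
        simp only [pvStepB, if_neg hc, List.reverse_append, List.reverse_cons,
          List.reverse_nil, List.nil_append, List.singleton_append, h2, h1]
        by_cases hd : d = '\'' <;> simp [pvHeadQuote, hd, hc, pvG]

theorem pvTermRev_eq_G (s : List Char) : pvTermRev s = pvG s := by
  unfold pvTermRev
  rw [List.foldl_reverse]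
  simpa [pvStepB] using (pvFoldrB s).2

-- ===== VERDICT =====
theorem mudar_para_binario_spec : Claim_equal_mudar_para_binario := by
  intro termos _
  unfold Spec_mudar_para_binario mudar_para_binario mudar_para_binario_alt
  have : (fun (binarios : List String) (termo : String) => binarios ++ [String.ofList (pvAuxA termo.toList)])
      = (fun binarios termo => binarios ++ [String.ofList (pvTermRev termo.toList)]) := by
    funext binarios termo
    rw [pvAuxA_eq_G, pvTermRev_eq_G]
  rw [this]
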